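-- pv_equiv track=rewrite | github.com/wojtekkkkkkowww/kompilator | PseudoCode.py | prep_num
-- ===== SOURCE A (Python) =====
-- def prep_num(num):
--     bin_r = bin(num)[2:]
--     ones = 0
--     l = []
--     for i in bin_r:
--         if i == '1':
--             ones+= 1
--         if i == '0':
--             if ones > 0:
--                 l.append(ones)
--             l.append(0)
--             ones = 0
--     if ones > 0:
--         l.append(ones)
--
--     return l
-- ===== SOURCE B (Python) =====
-- def prep_num(num):
--     s = bin(num)[2:]
--     l = []
--     i = 0
--     while i < len(s):
--         j = i
--         while j < len(s) and s[j] == s[i]: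
--             j += 1
--         if s[i] == '1':
--             l.append(j - i)
--         elif s[i] == '0':
--             l.extend([0] * (j - i))
--         i = j
--     return l
-- ===== Notes on version B (the rewrite author's own statement) =====
-- stated objective: alternative
-- what changed: Replaces A's running-counter state machine (ones accumulator reset on each '0') with a run-length scan: B finds each maximal run of equal characters with an inner pointer and emits its encoding (run length for '1'-runs, that many 0s for '0'-runs, nothing for the 'b' of negatives) in one step.
import Mathlib
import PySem

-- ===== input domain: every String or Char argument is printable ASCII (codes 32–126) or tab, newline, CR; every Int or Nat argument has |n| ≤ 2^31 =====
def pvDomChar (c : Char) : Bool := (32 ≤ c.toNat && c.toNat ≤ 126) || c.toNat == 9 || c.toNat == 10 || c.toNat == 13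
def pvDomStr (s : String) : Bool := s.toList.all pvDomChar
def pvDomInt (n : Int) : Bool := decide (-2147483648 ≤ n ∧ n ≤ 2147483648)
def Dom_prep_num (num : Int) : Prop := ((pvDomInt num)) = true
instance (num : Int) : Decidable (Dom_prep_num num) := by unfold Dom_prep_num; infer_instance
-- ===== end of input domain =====

-- B replaces A's running-counter state machine with a run-length scan over maximal runs; same output, same cost.
-- ===== PORT A =====
-- bin(n) digits for n : Nat, most significant first (bin(0)[2:] = "0")
def pvBinGo (n : Nat) : List Char :=
  if _h : n = 0 then []
  else pvBinGo (n / 2) ++ [if n % 2 = 1 then '1' else '0']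
decreasing_by exact Nat.div_lt_self (Nat.pos_of_ne_zero _h) (by norm_num)

def pvBinNat (n : Nat) : List Char := if n = 0 then ['0'] else pvBinGo n

-- bin(num)[2:]: for negatives the '-0b' prefix loses only '-0', leaving a stray 'b'
def pvBinR (num : Int) : List Char :=
  if num < 0 then 'b' :: pvBinNat num.natAbs else pvBinNat num.natAbs

-- one iteration of A's for-loop body, state = (ones, l)
def pvStep (st : Int × List Int) (i : Char) : Int × List Int :=
  let ones := if i = '1' then st.1 + 1 else st.1
  if i = '0' then (0, (if ones > 0 then st.2 ++ [ones] else st.2) ++ [0])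
  else (ones, st.2)

def prep_num (num : Int) : List Int :=
  let bin_r := pvBinR num
  let st := bin_r.foldl pvStep (0, [])
  if st.1 > 0 then st.2 ++ [st.1] else st.2

-- ===== PORT B =====
-- outer while loop: peel one maximal run (inner while = takeWhile/dropWhile), emit it
def pvRunsEmit (cs : List Char) : List Int :=
  match cs with
  | [] => []
  | c :: rest =>
      let k : Nat := 1 + (rest.takeWhile (· = c)).length
      (if c = '1' then [(k : Int)] else if c = '0' then List.replicate k 0 else [])
        ++ pvRunsEmit (rest.dropWhile (· = c))
termination_by cs.length
decreasing_by
  simp only [List.length_cons]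
  exact Nat.lt_succ_of_le (List.length_dropWhile_le _ _)

def prep_num_alt (num : Int) : List Int := pvRunsEmit (pvBinR num)

-- ===== PRECONDITION & SPEC =====
def Spec_prep_num (num : Int) (out : List Int) : Prop := out = prep_num_alt num
instance (num : Int) (out : List Int) : Decidable (Spec_prep_num num out) := by unfold Spec_prep_num; infer_instance

-- ===== CLAIM (what is proved, stated in full; the proofs are below) =====
def Claim_equal_prep_num : Prop := ∀ (num : Int), Dom_prep_num num → Spec_prep_num num (prep_num num)

-- ===== LEMMAS AND PROOFS =====

-- the run-length output as a recursion over characters with pending-ones state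
def pvOut (ones : Int) : List Char → List Int
  | [] => if ones > 0 then [ones] else []
  | c :: cs =>
      if c = '1' then pvOut (ones + 1) cs
      else if c = '0' then (if ones > 0 then [ones] else []) ++ 0 :: pvOut 0 cs
      else pvOut ones cs

def pvBinary (cs : List Char) : Prop := ∀ c ∈ cs, c = '0' ∨ c = '1'

lemma pvStep_one (st : Int × List Int) : pvStep st '1' = (st.1 + 1, st.2) := by
  simp [pvStep]

lemma pvStep_zero (st : Int × List Int) :
    pvStep st '0' = (0, (if st.1 > 0 then st.2 ++ [st.1] else st.2) ++ [0]) := by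
  simp [pvStep]

lemma pvStep_other (st : Int × List Int) (c : Char) (h1 : c ≠ '1') (h0 : c ≠ '0') :
    pvStep st c = st := by
  simp [pvStep, h1, h0]

lemma pvFoldA (cs : List Char) : ∀ (ones : Int) (l : List Int),
    (let st := cs.foldl pvStep (ones, l)
     if st.1 > 0 then st.2 ++ [st.1] else st.2) = l ++ pvOut ones cs := by
  induction cs with
  | nil =>
    intro ones l
    simp only [List.foldl_nil, pvOut]
    split <;> simp
  | cons c cs ih =>
    intro ones l
    by_cases h1 : c = '1'
    · subst h1
      rw [List.foldl_cons, pvStep_one]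
      simpa [pvOut] using ih (ones + 1) l
    · by_cases h0 : c = '0'
      · subst h0
        rw [List.foldl_cons, pvStep_zero]
        have := ih 0 ((if ones > 0 then l ++ [ones] else l) ++ [0])
        rw [this]
        have hne : ¬ (('0' : Char) = '1') := by decide
        simp only [pvOut, hne, if_false]
        by_cases hp : ones > 0 <;> simp [hp]
      · rw [List.foldl_cons, pvStep_other _ _ h1 h0]
        rw [ih ones l]
        simp [pvOut, h1, h0]

lemma pvOut_zeros (cs : List Char) :
    pvOut 0 cs = List.replicate (cs.takeWhile (· = '0')).length 0
      ++ pvOut 0 (cs.dropWhile (· = '0')) := by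
  induction cs with
  | nil => simp
  | cons c cs ih =>
    by_cases h0 : c = '0'
    · subst h0
      have hout : pvOut 0 ('0' :: cs) = 0 :: pvOut 0 cs := by simp [pvOut]
      rw [hout, ih, List.takeWhile_cons, List.dropWhile_cons]
      simp [List.replicate_succ]
    · rw [List.takeWhile_cons, List.dropWhile_cons]
      simp [h0]

lemma pvOut_ones (cs : List Char) : ∀ (k : Int), 0 < k → pvBinary cs →
    pvOut k cs = (k + ((cs.takeWhile (· = '1')).length : Int))
      :: pvOut 0 (cs.dropWhile (· = '1')) := by
  induction cs with
  | nil => intro k hk _; simp [pvOut, hk]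
  | cons c cs ih =>
    intro k hk hb
    by_cases h1 : c = '1'
    · subst h1
      have hrec := ih (k + 1) (by omega) (fun c hc => hb c (List.mem_cons_of_mem _ hc))
      have hout : pvOut k ('1' :: cs) = pvOut (k + 1) cs := by simp [pvOut]
      rw [hout, hrec, List.takeWhile_cons, List.dropWhile_cons]
      simp only [decide_true]
      congr 1
      push_cast [List.length_cons]
      omega
    · have h0 : c = '0' := by
        rcases hb c (List.mem_cons_self) with h | h
        · exact h
        · exact absurd h h1
      subst h0
      rw [List.takeWhile_cons, List.dropWhile_cons]
      simp [pvOut, hk]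

lemma pvRunsEmit_eq (n : Nat) : ∀ cs : List Char, cs.length ≤ n → pvBinary cs →
    pvRunsEmit cs = pvOut 0 cs := by
  induction n with
  | zero =>
    intro cs hlen _
    have : cs = [] := List.eq_nil_of_length_eq_zero (Nat.le_zero.mp hlen)
    subst this; simp [pvRunsEmit, pvOut]
  | succ n ih =>
    intro cs hlen hb
    match cs with
    | [] => simp [pvRunsEmit, pvOut]
    | c :: rest =>
      have hrest : pvBinary rest := fun x hx => hb x (List.mem_cons_of_mem _ hx)
      have hdropb : pvBinary (rest.dropWhile (· = c)) :=
        fun x hx => hrest x ((List.dropWhile_sublist _).mem hx)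
      have hdroplen : (rest.dropWhile (· = c)).length ≤ n := by
        have := List.length_dropWhile_le (fun x => decide (x = c)) rest
        simp only [List.length_cons] at hlen
        omega
      have ihd := ih _ hdroplen hdropb
      rcases hb c List.mem_cons_self with h0 | h1
      · subst h0
        rw [pvRunsEmit]
        have hne : ¬ (('0' : Char) = '1') := by decide
        simp only [hne, if_false]
        rw [ihd, pvOut_zeros (('0' : Char) :: rest)]
        rw [List.takeWhile_cons, List.dropWhile_cons]
        simp [Nat.add_comm]
      · subst h1
        rw [pvRunsEmit]
        simp only []
        have hout : pvOut 0 (('1' : Char) :: rest) = pvOut 1 rest := by simp [pvOut]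
        rw [hout, pvOut_ones rest 1 (by norm_num) hrest, ihd]
        simp only [ite_true, List.singleton_append, List.cons.injEq, and_true]
        push_cast
        ring

lemma pvBinGo_binary (n : Nat) : pvBinary (pvBinGo n) := by
  induction n using Nat.strong_induction_on with
  | _ n ih =>
    rw [pvBinGo]
    split
    · intro c hc; simp at hc
    · rename_i h
      intro c hc
      rcases List.mem_append.mp hc with hm | hm
      · exact ih (n / 2) (Nat.div_lt_self (Nat.pos_of_ne_zero h) (by norm_num)) c hm
      · simp at hm
        subst hm
        split <;> simp

lemma pvBinNat_binary (n : Nat) : pvBinary (pvBinNat n) := by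
  unfold pvBinNat
  split
  · intro c hc; simp at hc; subst hc; left; rfl
  · exact pvBinGo_binary n

lemma pvTakeDrop_b (ds : List Char) (hb : pvBinary ds) :
    ds.takeWhile (· = 'b') = [] ∧ ds.dropWhile (· = 'b') = ds := by
  match ds with
  | [] => simp
  | c :: rest =>
    have : c ≠ 'b' := by
      rcases hb c List.mem_cons_self with h | h <;> subst h <;> decide
    rw [List.takeWhile_cons, List.dropWhile_cons]
    simp [this]

-- ===== VERDICT (by name: the statement is the Claim_ definition above) =====
theorem prep_num_spec : Claim_equal_prep_num := by
  intro num _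
  unfold Spec_prep_num prep_num prep_num_alt
  rw [pvFoldA (pvBinR num) 0 []]
  simp only [List.nil_append]
  unfold pvBinR
  split
  · -- negative: stray 'b' first, skipped by both
    have hb := pvBinNat_binary num.natAbs
    obtain ⟨ht, hd⟩ := pvTakeDrop_b _ hb
    rw [pvRunsEmit]
    have h1 : ¬ (('b' : Char) = '1') := by decide
    have h0 : ¬ (('b' : Char) = '0') := by decide
    simp only [if_neg h1, if_neg h0, List.nil_append, hd]
    rw [pvRunsEmit_eq (pvBinNat num.natAbs).length _ le_rfl hb]
    have : pvOut 0 ('b' :: pvBinNat num.natAbs) = pvOut 0 (pvBinNat num.natAbs) := by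
      simp [pvOut]
    rw [this]
  · rw [pvRunsEmit_eq (pvBinNat num.natAbs).length _ le_rfl (pvBinNat_binary num.natAbs)]
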